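-- pv_equiv track=rewrite | github.com/jbscwy/orgMiner | git_store/my/orgMiner/evaluate/获取矩阵.py | _after_resource_group_matrix
-- ===== SOURCE A (Python) =====
-- def add_array(a,b):
--     for i in range(len(a)):
--         a[i]=a[i]+b[i]
--     return a
--
-- def multiply_matrix(copy_resource_group_matrix,rgm):
--     full_resource_group_matrix=[[0 for col in range(len(copy_resource_group_matrix[0]))] for row in range(len(copy_resource_group_matrix))]
--     for i in range(len(copy_resource_group_matrix)):
--         for j in range(len(copy_resource_group_matrix[0])):
--             full_resource_group_matrix[i][j]=copy_resource_group_matrix[i][j]*rgm[i][j]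
--     return full_resource_group_matrix
--
-- def _after_resource_group_matrix(resource_group_matrix,resource_matrix,labels):
--     # 获取全分配执行组执行模式矩阵
--     import copy
--     copy_resource_group_matrix = copy.copy(resource_group_matrix)
--     rgm = [[0 for col in range(len(resource_group_matrix[0]))] for row in range(len(resource_group_matrix))]
--     for rg in range(len(resource_group_matrix)):
--         for i in range(len(labels)):
--             if rg == labels[i]:
--                 add_array(rgm[rg], resource_matrix[i])
--     # 两个矩阵相乘
--     full_resource_group_matrix = multiply_matrix(copy_resource_group_matrix, rgm)
--     return full_resource_group_matrix
-- ===== SOURCE B (Python) =====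
-- def _after_resource_group_matrix(resource_group_matrix, resource_matrix, labels):
--     G = len(resource_group_matrix)
--     W = len(resource_group_matrix[0]) if resource_group_matrix else 0
--     # one pass over labels: accumulate the sum vector for each in-range group label
--     sums = {}
--     for i, lab in enumerate(labels):
--         if 0 <= lab < G:
--             row = resource_matrix[i]
--             s = sums.get(lab)
--             if s is None:
--                 sums[lab] = [row[j] for j in range(W)]
--             else:
--                 for j in range(W):
--                     s[j] += row[j]
--     zero = [0] * W
--     return [[resource_group_matrix[g][j] * sums.get(g, zero)[j] for j in range(W)]
--             for g in range(G)]
-- ===== Notes on version B (the rewrite author's own statement) =====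
-- stated objective: alternative
-- what changed: A scans the whole labels list once per group row (G×L nested passes, summing in place into a zero matrix); B makes a single build pass over labels accumulating per-group running sum vectors in a dict, then a separate reduce pass constructs each output row by elementwise multiplication, touching resource_matrix[i] only for in-range labels exactly as A does.
import Mathlib
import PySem

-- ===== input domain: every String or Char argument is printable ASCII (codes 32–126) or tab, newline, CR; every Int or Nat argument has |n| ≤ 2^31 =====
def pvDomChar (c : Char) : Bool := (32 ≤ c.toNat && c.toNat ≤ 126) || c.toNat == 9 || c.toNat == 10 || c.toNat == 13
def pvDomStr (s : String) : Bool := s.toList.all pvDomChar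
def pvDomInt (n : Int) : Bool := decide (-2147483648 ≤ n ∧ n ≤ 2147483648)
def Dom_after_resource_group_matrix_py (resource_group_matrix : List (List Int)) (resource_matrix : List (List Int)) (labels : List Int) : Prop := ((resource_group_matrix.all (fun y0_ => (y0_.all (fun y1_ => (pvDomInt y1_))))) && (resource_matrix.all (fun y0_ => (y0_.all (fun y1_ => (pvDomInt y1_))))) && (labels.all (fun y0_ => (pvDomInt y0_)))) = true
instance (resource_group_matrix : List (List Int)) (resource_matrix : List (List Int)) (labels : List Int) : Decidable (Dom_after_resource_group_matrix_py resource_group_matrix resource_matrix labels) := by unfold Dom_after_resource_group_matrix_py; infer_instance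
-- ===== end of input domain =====

-- B replaces A's G×L repeated scan of labels (one pass per group row) by a single build pass
-- over labels (a dict of per-group running sum vectors) followed by a row-by-row reduce pass;
-- the equivalence is about the return value (A's in-place writes touch only its fresh lists).

-- ===== PORT A =====
-- add_array writes a[i] = a[i] + b[i] at strictly increasing distinct indices, each read
-- before its own write, so its result is exactly this pointwise map; indices produced by
-- range(len(..)) are always in range, so List.getD is exact indexing in these loops.
def pyAddArray (a b : List Int) : List Int :=
  (List.range a.length).map (fun i => a.getD i 0 + b.getD i 0)

def pyMultiplyMatrix (c rgm : List (List Int)) : List (List Int) :=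
  (List.range c.length).map (fun i =>
    (List.range (c.getD 0 []).length).map (fun j =>
      (c.getD i []).getD j 0 * (rgm.getD i []).getD j 0))

def after_resource_group_matrix_py (resource_group_matrix : List (List Int)) (resource_matrix : List (List Int)) (labels : List Int) : List (List Int) :=
  let W := (resource_group_matrix.getD 0 []).length
  let rgm0 : List (List Int) :=
    (List.range resource_group_matrix.length).map (fun _ => (List.range W).map (fun _ => (0 : Int)))
  let rgm := (List.range resource_group_matrix.length).foldl (fun (acc : List (List Int)) (rg : Nat) =>
      (List.range labels.length).foldl (fun (acc : List (List Int)) (i : Nat) =>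
        if (rg : Int) = labels.getD i 0 then
          acc.set rg (pyAddArray (acc.getD rg []) (resource_matrix.getD i []))
        else acc) acc) rgm0
  pyMultiplyMatrix resource_group_matrix rgm

-- ===== PORT B =====
def after_resource_group_matrix_py_alt (resource_group_matrix : List (List Int)) (resource_matrix : List (List Int)) (labels : List Int) : List (List Int) :=
  let Gn : Int := resource_group_matrix.length
  let W : Nat := if resource_group_matrix.isEmpty then 0 else (resource_group_matrix.headD []).length
  let sums : PySem.Dict Int (List Int) :=
    (PySem.List.enumerate labels 0).foldl (fun (d : PySem.Dict Int (List Int)) (p : Int × Int) =>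
      if 0 ≤ p.2 ∧ p.2 < Gn then
        match d.get? p.2 with
        | none => d.insert p.2 ((List.range W).map (fun j => (PySem.List.pyGetD resource_matrix p.1 []).getD j 0))
        | some s => d.insert p.2 ((List.range W).map (fun j => s.getD j 0 + (PySem.List.pyGetD resource_matrix p.1 []).getD j 0))
      else d) PySem.Dict.empty
  let zero : List Int := List.replicate W 0
  (List.range resource_group_matrix.length).map (fun g =>
    (List.range W).map (fun j => ((resource_group_matrix.getD g []).getD j 0) * ((sums.getD (g : Int) zero).getD j 0)))

-- ===== PRECONDITION & SPEC =====
-- Pre_ excludes exactly the inputs on which the Python A raises IndexError: a group row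
-- shorter than the first group row, or an in-range label at a position i where
-- resource_matrix has no row i or a row shorter than the first group row.
def Pre_after_resource_group_matrix_py (resource_group_matrix : List (List Int)) (resource_matrix : List (List Int)) (labels : List Int) : Prop :=
  (∀ row ∈ resource_group_matrix, (resource_group_matrix.getD 0 []).length ≤ row.length) ∧
  (∀ i < labels.length, (0 ≤ labels.getD i 0 ∧ labels.getD i 0 < (resource_group_matrix.length : Int)) →
      i < resource_matrix.length ∧ (resource_group_matrix.getD 0 []).length ≤ (resource_matrix.getD i []).length)
instance (resource_group_matrix : List (List Int)) (resource_matrix : List (List Int)) (labels : List Int) : Decidable (Pre_after_resource_group_matrix_py resource_group_matrix resource_matrix labels) := by unfold Pre_after_resource_group_matrix_py; infer_instance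

def pvWitness_after_resource_group_matrix_py : List (List Int) × List (List Int) × List Int :=
  ([[1, 2], [3, 4]], [[5, 6], [7, 8], [9, 10]], [0, 1, 0])

def Spec_after_resource_group_matrix_py (resource_group_matrix : List (List Int)) (resource_matrix : List (List Int)) (labels : List Int) (out : List (List Int)) : Prop := out = after_resource_group_matrix_py_alt resource_group_matrix resource_matrix labels
instance (resource_group_matrix : List (List Int)) (resource_matrix : List (List Int)) (labels : List Int) (out : List (List Int)) : Decidable (Spec_after_resource_group_matrix_py resource_group_matrix resource_matrix labels out) := by unfold Spec_after_resource_group_matrix_py; infer_instance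

-- ===== CLAIM (what is proved, stated in full; the proofs are below) =====
def Claim_equal_after_resource_group_matrix_py : Prop := ∀ (resource_group_matrix : List (List Int)) (resource_matrix : List (List Int)) (labels : List Int), Dom_after_resource_group_matrix_py resource_group_matrix resource_matrix labels → Pre_after_resource_group_matrix_py resource_group_matrix resource_matrix labels → Spec_after_resource_group_matrix_py resource_group_matrix resource_matrix labels (after_resource_group_matrix_py resource_group_matrix resource_matrix labels)

-- ===== LEMMAS AND PROOFS =====

-- the common value both ports compute per group row: fold the matching resource rows
def pvRowFold (labels : List Int) (M : List (List Int)) (g : Int) (l : List Nat) (r : List Int) : List Int :=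
  l.foldl (fun r i => if g = labels.getD i 0 then pyAddArray r (M.getD i []) else r) r

theorem pv_innerA (labels : List Int) (M : List (List Int)) (g : Nat) :
    ∀ (l : List Nat) (acc : List (List Int)), g < acc.length →
      l.foldl (fun (acc : List (List Int)) (i : Nat) => if (g : Int) = labels.getD i 0 then
          acc.set g (pyAddArray (acc.getD g []) (M.getD i [])) else acc) acc
      = acc.set g (pvRowFold labels M (g : Int) l (acc.getD g [])) := by
  intro l
  induction l with
  | nil =>
    intro acc h
    simp only [List.foldl_nil, pvRowFold]
    rw [List.getD_eq_getElem acc [] h, List.set_getElem_self]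
  | cons i t ih =>
    intro acc h
    simp only [List.foldl_cons, pvRowFold] at *
    by_cases hc : (g : Int) = labels.getD i 0
    · rw [if_pos hc, if_pos hc]
      rw [ih (acc.set g (pyAddArray (acc.getD g []) (M.getD i []))) (by simpa using h)]
      rw [List.set_set]
      congr 2
      simp [List.getD_eq_getElem?_getD, h]
    · rw [if_neg hc, if_neg hc]
      exact ih acc h

theorem pv_outerA (labels : List Int) (M : List (List Int)) :
    ∀ (l : List Nat), l.Nodup → ∀ (acc : List (List Int)) (g : Nat), g < acc.length → (∀ rg ∈ l, rg < acc.length) →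
      ((l.foldl (fun (acc : List (List Int)) (rg : Nat) =>
          (List.range labels.length).foldl (fun (acc : List (List Int)) (i : Nat) => if (rg : Int) = labels.getD i 0 then
            acc.set rg (pyAddArray (acc.getD rg []) (M.getD i [])) else acc) acc) acc).getD g [])
      = if g ∈ l then pvRowFold labels M (g : Int) (List.range labels.length) (acc.getD g []) else acc.getD g [] := by
  intro l
  induction l with
  | nil =>
    intro _ acc g h _
    simp
  | cons rg t ih =>
    intro hnd acc g h hmem
    have hrg : rg < acc.length := hmem rg (List.mem_cons_self ..)
    simp only [List.foldl_cons]
    rw [pv_innerA labels M rg (List.range labels.length) acc hrg]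
    have hlen : (acc.set rg (pvRowFold labels M (rg : Int) (List.range labels.length) (acc.getD rg []))).length = acc.length := by
      simp
    rw [ih (List.nodup_cons.mp hnd).2 _ g (by omega) (by intro x hx; rw [hlen]; exact hmem x (List.mem_cons_of_mem _ hx))]
    by_cases hg : g = rg
    · subst hg
      have hnotin : g ∉ t := (List.nodup_cons.mp hnd).1
      rw [if_neg hnotin, if_pos (List.mem_cons_self ..)]
      simp [List.getD_eq_getElem?_getD, h]
    · have : (acc.set rg (pvRowFold labels M (rg : Int) (List.range labels.length) (acc.getD rg []))).getD g []
          = acc.getD g [] := by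
        simp [List.getD_eq_getElem?_getD, List.getElem?_set_ne (fun he => hg he.symm)]
      rw [this]
      simp [List.mem_cons, hg]

theorem pv_dictB (labels : List Int) (M : List (List Int)) (Gn : Int) (W : Nat) :
    ∀ (l : List Nat) (d : PySem.Dict Int (List Int)),
      (∀ g s, d.get? g = some s → s.length = W) →
      ∀ (g : Int), 0 ≤ g → g < Gn →
      ((l.foldl (fun (d : PySem.Dict Int (List Int)) (i : Nat) =>
          if 0 ≤ labels.getD i 0 ∧ labels.getD i 0 < Gn then
            match d.get? (labels.getD i 0) with
            | none => d.insert (labels.getD i 0) ((List.range W).map (fun j => (M.getD i []).getD j 0))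
            | some s => d.insert (labels.getD i 0) ((List.range W).map (fun j => s.getD j 0 + (M.getD i []).getD j 0))
          else d) d).getD g (List.replicate W 0))
      = pvRowFold labels M g l (d.getD g (List.replicate W 0)) := by
  intro l
  induction l with
  | nil =>
    intro d _ g _ _
    simp [pvRowFold]
  | cons i t ih =>
    intro d hinv g hg0 hgG
    simp only [List.foldl_cons, pvRowFold] at *
    by_cases hin : 0 ≤ labels.getD i 0 ∧ labels.getD i 0 < Gn
    · rw [if_pos hin]
      rcases hd : d.get? (labels.getD i 0) with _ | s
      · have hinv' : ∀ g' s', (d.insert (labels.getD i 0)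
            ((List.range W).map (fun j => (M.getD i []).getD j 0))).get? g' = some s' → s'.length = W := by
          intro g' s' hs'
          rw [PySem.Dict.get?_insert] at hs'
          by_cases hgl : g' = labels.getD i 0
          · rw [if_pos hgl] at hs'
            cases hs'
            simp
          · rw [if_neg hgl] at hs'
            exact hinv g' s' hs'
        rw [ih _ hinv' g hg0 hgG]
        congr 1
        rw [PySem.Dict.getD_insert]
        by_cases hgl : g = labels.getD i 0
        · have hd' : d.get? g = none := by rw [hgl]; exact hd
          rw [if_pos hgl, if_pos hgl, PySem.Dict.getD_of_get?_eq_none d (List.replicate W 0) hd']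
          simp only [pyAddArray, List.length_replicate]
          apply List.map_congr_left
          intro j hj
          simp [List.getD_eq_getElem?_getD, List.mem_range.mp hj]
        · rw [if_neg hgl, if_neg hgl]
      · have hsW : s.length = W := hinv _ _ hd
        have hinv' : ∀ g' s', (d.insert (labels.getD i 0)
            ((List.range W).map (fun j => s.getD j 0 + (M.getD i []).getD j 0))).get? g' = some s' → s'.length = W := by
          intro g' s' hs'
          rw [PySem.Dict.get?_insert] at hs'
          by_cases hgl : g' = labels.getD i 0
          · rw [if_pos hgl] at hs'
            cases hs'
            simp
          · rw [if_neg hgl] at hs'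
            exact hinv g' s' hs'
        rw [ih _ hinv' g hg0 hgG]
        congr 1
        rw [PySem.Dict.getD_insert]
        by_cases hgl : g = labels.getD i 0
        · have hd' : d.get? g = some s := by rw [hgl]; exact hd
          rw [if_pos hgl, if_pos hgl, PySem.Dict.getD_of_get?_eq_some d (List.replicate W 0) hd']
          simp only [pyAddArray, hsW]
        · rw [if_neg hgl, if_neg hgl]
    · rw [if_neg hin]
      have hne : ¬ (g = labels.getD i 0) := fun he => hin (he ▸ ⟨hg0, hgG⟩)
      rw [if_neg hne]
      exact ih d hinv g hg0 hgG

theorem pv_main (rgmM M : List (List Int)) (labels : List Int) :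
    after_resource_group_matrix_py rgmM M labels = after_resource_group_matrix_py_alt rgmM M labels := by
  have hW : (if rgmM.isEmpty then 0 else (rgmM.headD []).length) = (rgmM.getD 0 []).length := by
    cases rgmM <;> simp
  have henum : PySem.List.enumerate labels 0
      = (List.range labels.length).map (fun (k : Nat) => ((k : Int), labels.getD k 0)) := by
    rw [PySem.List.enumerate_eq_map_pyRange labels 0, PySem.List.pyRange_one]
    simp [List.map_map, Function.comp_def]
  unfold after_resource_group_matrix_py after_resource_group_matrix_py_alt pyMultiplyMatrix
  simp only [hW, henum, List.foldl_map, PySem.List.pyGetD_natCast]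
  apply List.map_congr_left
  intro g hg
  have hgG : g < rgmM.length := List.mem_range.mp hg
  have hz : (List.range (rgmM.getD 0 []).length).map (fun _ => (0 : Int))
      = List.replicate (rgmM.getD 0 []).length 0 := by
    simp
  have hA := pv_outerA labels M (List.range rgmM.length) List.nodup_range
      ((List.range rgmM.length).map (fun _ => (List.range (rgmM.getD 0 []).length).map (fun _ => (0 : Int))))
      g (by simpa using hgG) (by intro x hx; simpa using List.mem_range.mp hx)
  rw [if_pos hg] at hA
  have h0 : ((List.range rgmM.length).map
        (fun _ => (List.range (rgmM.getD 0 []).length).map (fun _ => (0 : Int)))).getD g []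
      = List.replicate (rgmM.getD 0 []).length 0 := by
    rw [← hz]
    simp [List.getD_eq_getElem?_getD, hgG]
  rw [h0] at hA
  have hB := pv_dictB labels M (rgmM.length : Int) (rgmM.getD 0 []).length
      (List.range labels.length) PySem.Dict.empty
      (by intro g' s' h; rw [PySem.Dict.get?_empty] at h; cases h)
      (g : Int) (by positivity) (by exact_mod_cast hgG)
  rw [PySem.Dict.getD_of_get?_eq_none PySem.Dict.empty (List.replicate (rgmM.getD 0 []).length 0)
      (PySem.Dict.get?_empty _)] at hB
  apply List.map_congr_left
  intro j _
  rw [hA, hB]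

-- ===== VERDICT (by name: the statement is the Claim_ definition above) =====
theorem after_resource_group_matrix_py_spec : Claim_equal_after_resource_group_matrix_py := by
  intro resource_group_matrix resource_matrix labels _ _
  unfold Spec_after_resource_group_matrix_py
  exact pv_main resource_group_matrix resource_matrix labels
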